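-- pv_equiv track=rewrite | github.com/moguiyu/NewsPrism | newsprism/service/clusterer.py | _collect_component
-- ===== SOURCE A (Python) =====
-- def _collect_component(start: int, adjacency: dict[int, set[int]]) -> set[int]:
--     stack = [start]
--     component: set[int] = set()
--     while stack:
--         idx = stack.pop()
--         if idx in component:
--             continue
--         component.add(idx)
--         stack.extend(sorted(adjacency.get(idx, ()), reverse=True))
--     return component
-- ===== SOURCE B (Python) =====
-- def _collect_component(start: int, adjacency: dict[int, set[int]]) -> set[int]:
--     def visit(component: list[int], idx: int) -> list[int]:
--         if idx in component:
--             return component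
--         return visit_all(component + [idx], sorted(adjacency.get(idx, ())))
--
--     def visit_all(component: list[int], pending: list[int]) -> list[int]:
--         if not pending:
--             return component
--         return visit_all(visit(component, pending[0]), pending[1:])
--
--     return set(visit([], start))
-- ===== Notes on version B (the rewrite author's own statement) =====
-- stated objective: alternative
-- what changed: Replaces the explicit-stack while loop (push reverse-sorted neighbours, pop, skip visited, mutate a set) by a pair of mutually recursive functions visit/visit_all that thread an ordered duplicate-free list through the traversal and convert it to a set at the end; the stack and its reverse/pop bookkeeping disappear.
import Mathlib
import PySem

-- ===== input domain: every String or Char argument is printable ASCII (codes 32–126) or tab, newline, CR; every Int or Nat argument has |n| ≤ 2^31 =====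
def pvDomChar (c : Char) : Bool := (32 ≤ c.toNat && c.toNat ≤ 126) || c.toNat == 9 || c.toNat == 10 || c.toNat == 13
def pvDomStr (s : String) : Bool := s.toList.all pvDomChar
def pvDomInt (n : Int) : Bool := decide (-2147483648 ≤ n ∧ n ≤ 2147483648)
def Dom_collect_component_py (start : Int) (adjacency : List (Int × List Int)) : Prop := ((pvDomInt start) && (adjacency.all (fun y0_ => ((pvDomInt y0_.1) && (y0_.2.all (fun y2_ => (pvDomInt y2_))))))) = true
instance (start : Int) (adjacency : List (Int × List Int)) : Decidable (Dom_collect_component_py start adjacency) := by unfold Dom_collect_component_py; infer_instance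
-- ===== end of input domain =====

-- B replaces A's explicit-stack loop by two mutually recursive functions that thread an
-- ordered duplicate-free list through the traversal (same return value; no speed claim).

-- ===== PORT A =====
-- sorted(adjacency.get(idx, ()), reverse=True); the stack is modelled top-first
-- (Python pops from the END), so A's 'extend' prepends the REVERSE of that descending list.
def pvNbrsA (adjacency : List (Int × List Int)) (idx : Int) : List Int :=
  (PySem.List.sorted (PySem.Dict.getD (PySem.Dict.mk adjacency) idx []) (fun x => x) true).reverse

-- the while-stack loop of A; the Nat fuel only makes the loop total (it is proved
-- sufficient below, so it is never exhausted on any input)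
def pvLoopA (adjacency : List (Int × List Int)) : Nat → PySem.Set Int → List Int → PySem.Set Int
  | 0, component, _ => component
  | _ + 1, component, [] => component
  | fuel + 1, component, idx :: stack =>
      if PySem.Set.contains component idx then
        pvLoopA adjacency fuel component stack
      else
        pvLoopA adjacency fuel (PySem.Set.add component idx) (pvNbrsA adjacency idx ++ stack)

def pvUniv (start : Int) (adjacency : List (Int × List Int)) : List Int :=
  start :: adjacency.flatMap (fun p => p.1 :: p.2)

def pvTot (adjacency : List (Int × List Int)) : Nat :=
  (adjacency.map (fun p => p.2.length)).sum

def collect_component_py (start : Int) (adjacency : List (Int × List Int)) : List Int :=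
  pvLoopA adjacency (1 + (pvUniv start adjacency).length * (pvTot adjacency + 1))
    PySem.Set.empty [start]

-- ===== PORT B =====
-- sorted(adjacency.get(idx, ())) of B's 'visit'
def pvAsc (adjacency : List (Int × List Int)) (idx : Int) : List Int :=
  PySem.List.sorted (PySem.Dict.getD (PySem.Dict.mk adjacency) idx []) (fun x => x) false

-- B's mutually recursive helpers 'visit' / 'visit_all'; the Nat fuel only makes the
-- recursion total (proved sufficient below)
mutual
def pvVisit (adjacency : List (Int × List Int)) : Nat → List Int → Int → List Int
  | 0, component, _ => component
  | fuel + 1, component, idx =>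
      if component.contains idx then component
      else pvVisitAll adjacency fuel (component ++ [idx]) (pvAsc adjacency idx)
termination_by fuel _ _ => (fuel, 0)
def pvVisitAll (adjacency : List (Int × List Int)) : Nat → List Int → List Int → List Int
  | _, component, [] => component
  | fuel, component, n :: pending =>
      pvVisitAll adjacency fuel (pvVisit adjacency fuel component n) pending
termination_by fuel _ pending => (fuel, pending.length + 1)
end

-- set(component) of B's final line
def collect_component_py_alt (start : Int) (adjacency : List (Int × List Int)) : List Int :=
  PySem.Set.ofList
    (pvVisit adjacency (2 + adjacency.length + (adjacency.map (fun p => p.2.length)).sum) [] start)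

-- ===== PRECONDITION & SPEC =====
def Spec_collect_component_py (start : Int) (adjacency : List (Int × List Int)) (out : List Int) : Prop := out = collect_component_py_alt start adjacency
instance (start : Int) (adjacency : List (Int × List Int)) (out : List Int) : Decidable (Spec_collect_component_py start adjacency out) := by unfold Spec_collect_component_py; infer_instance

-- ===== CLAIM (what is proved, stated in full; the proofs are below) =====
def Claim_equal_collect_component_py : Prop := ∀ (start : Int) (adjacency : List (Int × List Int)), Dom_collect_component_py start adjacency → Spec_collect_component_py start adjacency (collect_component_py start adjacency)

-- ===== LEMMAS AND PROOFS =====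

-- B's visit_all is a left fold of visit
theorem pvVisitAll_eq_foldl (adj : List (Int × List Int)) (f : Nat) :
    ∀ (l : List Int) (c : List Int),
      pvVisitAll adj f c l = l.foldl (fun c y => pvVisit adj f c y) c := by
  intro l
  induction l with
  | nil => intro c; rw [pvVisitAll]; rfl
  | cons n t ih => intro c; rw [pvVisitAll]; simp [ih]

theorem pvVisit_succ (adj : List (Int × List Int)) (f : Nat) (c : List Int) (x : Int) :
    pvVisit adj (f+1) c x
      = if c.contains x then c
        else (pvAsc adj x).foldl (fun c y => pvVisit adj f c y) (c ++ [x]) := by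
  rw [pvVisit]; split
  · rfl
  · rw [pvVisitAll_eq_foldl]

theorem pvVisit_zero (adj : List (Int × List Int)) (c : List Int) (x : Int) :
    pvVisit adj 0 c x = c := by rw [pvVisit]

-- Python 'in' on A's set and on B's list is the same membership test
theorem pvContains_eq (c : List Int) (x : Int) : PySem.Set.contains c x = c.contains x := rfl

-- reverse of the stable descending sort = the stable ascending sort (identity key on Int)
theorem pvNbrsA_eq (adjacency : List (Int × List Int)) (idx : Int) :
    pvNbrsA adjacency idx = pvAsc adjacency idx := by
  unfold pvNbrsA pvAsc
  apply PySem.List.eq_of_perm_of_pairwise_le_of_injective (key := fun x : Int => x)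
    (fun _ _ h => h)
  · exact (List.reverse_perm _).trans ((PySem.List.sorted_perm _ _ _).trans
      (PySem.List.sorted_perm _ _ _).symm)
  · exact List.pairwise_reverse.mpr (PySem.List.sorted_pairwise_rev _ _)
  · exact PySem.List.sorted_pairwise _ _

-- unvisited count: elements of U not yet in the component
def pvU (U : List Int) (c : List Int) : Nat :=
  (U.filter (fun y => decide (y ∉ c))).length

theorem pvFilterLenMono {p q : Int → Bool} (h : ∀ a, q a = true → p a = true) :
    ∀ l : List Int, (l.filter q).length ≤ (l.filter p).length := by
  intro l
  induction l with
  | nil => simp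
  | cons a t ih =>
      by_cases hq : q a = true
      · simp [hq, h a hq]; omega
      · simp only [List.filter_cons]
        rw [Bool.not_eq_true] at hq
        rw [hq]
        by_cases hp : p a = true
        · simp [hp]; omega
        · rw [Bool.not_eq_true] at hp; rw [hp]; simpa using ih

theorem pvFilterLenLt {p q : Int → Bool} (h : ∀ a, q a = true → p a = true) (x : Int) :
    ∀ l : List Int, x ∈ l → p x = true → q x = false →
      (l.filter q).length < (l.filter p).length := by
  intro l
  induction l with
  | nil => simp
  | cons a t ih =>
      intro hx hp hq
      rcases List.mem_cons.mp hx with rfl | hx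
      · simp only [List.filter_cons, hp, hq]
        simp only [if_true]
        have := pvFilterLenMono h t
        simp; omega
      · have := ih hx hp hq
        simp only [List.filter_cons]
        by_cases hqa : q a = true
        · simp [hqa, h a hqa]; omega
        · rw [Bool.not_eq_true] at hqa; rw [hqa]
          by_cases hpa : p a = true
          · simp [hpa]; omega
          · rw [Bool.not_eq_true] at hpa; rw [hpa]; exact this

theorem pvU_anti (U : List Int) (c c' : List Int) (h : ∀ y, y ∈ c → y ∈ c') :
    pvU U c' ≤ pvU U c := by
  apply pvFilterLenMono
  intro a ha
  simp only [decide_eq_true_eq] at ha ⊢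
  exact fun hc => ha (h a hc)

theorem pvU_lt (U : List Int) (c : List Int) (x : Int) (hxU : x ∈ U) (hxc : x ∉ c) :
    pvU U (c ++ [x]) < pvU U c := by
  apply pvFilterLenLt _ x _ hxU
  · simp [hxc]
  · simp
  · intro a ha
    simp only [decide_eq_true_eq, List.mem_append, List.mem_singleton] at ha ⊢
    exact fun hc => ha (Or.inl hc)

theorem pvVisitPrefix (adjacency : List (Int × List Int)) :
    ∀ (fuel : Nat) (c : List Int) (x : Int), c <+: pvVisit adjacency fuel c x := by
  intro fuel
  induction fuel with
  | zero => intro c x; rw [pvVisit_zero]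
  | succ f ih =>
      intro c x
      rw [pvVisit_succ]
      split
      · exact List.prefix_refl _
      · have hfold : ∀ (l : List Int) (c' : List Int),
            c' <+: l.foldl (fun c y => pvVisit adjacency f c y) c' := by
          intro l
          induction l with
          | nil => intro c'; exact List.prefix_refl _
          | cons y t iht =>
              intro c'
              exact (ih c' y).trans (iht (pvVisit adjacency f c' y))
        exact (List.prefix_append _ _).trans (hfold _ _)

theorem pvGetD_mem (d : List (Int × List Int)) (k y : Int)
    (h : y ∈ PySem.Dict.getD (PySem.Dict.mk d) k []) :
    y ∈ d.flatMap (fun p => p.1 :: p.2) := by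
  induction d with
  | nil =>
      rw [PySem.Dict.getD_eq_get?_getD] at h
      have hget : (PySem.Dict.mk ([] : List (Int × List Int))).get? k = none := by
        simp [pysem]
      rw [hget] at h
      simp at h
  | cons p t ih =>
      rw [PySem.Dict.getD_eq_get?_getD, PySem.Dict.get?_mk_cons] at h
      by_cases hk : p.1 == k
      · rw [if_pos hk] at h
        simp only [Option.getD_some] at h
        simp only [List.flatMap_cons, List.mem_append, List.mem_cons]
        exact Or.inl (Or.inr h)
      · rw [if_neg hk] at h
        rw [← PySem.Dict.getD_eq_get?_getD] at h
        simp only [List.flatMap_cons, List.mem_append]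
        exact Or.inr (ih h)

theorem pvAsc_mem (adjacency : List (Int × List Int)) (z y : Int)
    (h : y ∈ pvAsc adjacency z) : y ∈ adjacency.flatMap (fun p => p.1 :: p.2) := by
  unfold pvAsc at h
  exact pvGetD_mem adjacency z y ((PySem.List.mem_sorted _ _ _ _).mp h)

theorem pvGetD_len (d : List (Int × List Int)) (k : Int) :
    (PySem.Dict.getD (PySem.Dict.mk d) k []).length ≤ pvTot d := by
  induction d with
  | nil =>
      rw [PySem.Dict.getD_eq_get?_getD]
      have hget : (PySem.Dict.mk ([] : List (Int × List Int))).get? k = none := by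
        simp [pysem]
      rw [hget]
      simp [pvTot]
  | cons p t ih =>
      rw [PySem.Dict.getD_eq_get?_getD, PySem.Dict.get?_mk_cons]
      unfold pvTot
      simp only [List.map_cons, List.sum_cons]
      by_cases hk : p.1 == k
      · rw [if_pos hk]; simp only [Option.getD_some]; omega
      · rw [if_neg hk, ← PySem.Dict.getD_eq_get?_getD]
        have := ih
        unfold pvTot at this
        omega

theorem pvAsc_len (adjacency : List (Int × List Int)) (z : Int) :
    (pvAsc adjacency z).length ≤ pvTot adjacency := by
  unfold pvAsc
  rw [PySem.List.length_sorted]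
  exact pvGetD_len adjacency z

-- fuel irrelevance for the recursive DFS, by induction on the unvisited count
theorem pvVisitFuel (adjacency : List (Int × List Int)) (U : List Int)
    (hcl : ∀ z y, y ∈ pvAsc adjacency z → y ∈ U) :
    ∀ (k : Nat) (c : List Int) (x : Int) (f g : Nat), x ∈ U → pvU U c ≤ k →
      pvU U c < f → pvU U c < g → pvVisit adjacency f c x = pvVisit adjacency g c x := by
  intro k
  induction k with
  | zero =>
      intro c x f g hxU hk hf hg
      obtain ⟨f', rfl⟩ : ∃ f', f = f' + 1 := ⟨f - 1, by omega⟩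
      obtain ⟨g', rfl⟩ : ∃ g', g = g' + 1 := ⟨g - 1, by omega⟩
      have hx : c.contains x = true := by
        by_contra hcc
        have : x ∉ c := fun hm => hcc ((PySem.Set.contains_iff _ _).mpr hm)
        have hlt := pvU_lt U c x hxU this
        omega
      rw [pvVisit_succ, pvVisit_succ, if_pos hx, if_pos hx]
  | succ k ih =>
      intro c x f g hxU hk hf hg
      obtain ⟨f', rfl⟩ : ∃ f', f = f' + 1 := ⟨f - 1, by omega⟩
      obtain ⟨g', rfl⟩ : ∃ g', g = g' + 1 := ⟨g - 1, by omega⟩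
      rw [pvVisit_succ, pvVisit_succ]
      by_cases hx : c.contains x = true
      · rw [if_pos hx, if_pos hx]
      · rw [if_neg hx, if_neg hx]
        have hxc : x ∉ c := fun hm => hx ((PySem.Set.contains_iff _ _).mpr hm)
        have hdec := pvU_lt U c x hxU hxc
        have hfold : ∀ (l : List Int), (∀ y ∈ l, y ∈ U) → ∀ (c' : List Int),
            (c ++ [x]) <+: c' →
            l.foldl (fun c y => pvVisit adjacency f' c y) c'
              = l.foldl (fun c y => pvVisit adjacency g' c y) c' := by
          intro l
          induction l with
          | nil => intro _ c' _; rfl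
          | cons y t iht =>
              intro hl c' hpre
              have hsub : ∀ w, w ∈ c ++ [x] → w ∈ c' := fun w hw => hpre.subset hw
              have hc' : pvU U c' ≤ pvU U (c ++ [x]) := pvU_anti _ _ _ hsub
              have h1 : pvVisit adjacency f' c' y = pvVisit adjacency g' c' y := by
                apply ih c' y f' g' (hl y (List.mem_cons_self))
                · omega
                · omega
                · omega
              simp only [List.foldl_cons]
              rw [h1]
              exact iht (fun z hz => hl z (List.mem_cons_of_mem _ hz))
                (pvVisit adjacency g' c' y) (hpre.trans (pvVisitPrefix adjacency g' c' y))
        exact hfold _ (fun y hy => hcl x y hy) _ (List.prefix_refl _)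

-- fuel irrelevance lifted to a foldl over a list of U-elements
theorem pvFoldFuel (adjacency : List (Int × List Int)) (U : List Int)
    (hcl : ∀ z y, y ∈ pvAsc adjacency z → y ∈ U) :
    ∀ (l : List Int) (c : List Int) (f g : Nat), (∀ y ∈ l, y ∈ U) →
      pvU U c < f → pvU U c < g →
      l.foldl (fun c y => pvVisit adjacency f c y) c
        = l.foldl (fun c y => pvVisit adjacency g c y) c := by
  intro l
  induction l with
  | nil => intro c f g _ _ _; rfl
  | cons y t ih =>
      intro c f g hl hf hg
      have h1 : pvVisit adjacency f c y = pvVisit adjacency g c y :=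
        pvVisitFuel adjacency U hcl (pvU U c) c y f g (hl y List.mem_cons_self) le_rfl hf hg
      simp only [List.foldl_cons]
      rw [h1]
      have hpre := pvVisitPrefix adjacency g c y
      have hc' : pvU U (pvVisit adjacency g c y) ≤ pvU U c :=
        pvU_anti _ _ _ (fun w hw => hpre.subset hw)
      exact ih _ f g (fun z hz => hl z (List.mem_cons_of_mem _ hz)) (by omega) (by omega)

-- the heart: A's stack loop is B's visit folded over the stack
theorem pvLoopMain (adjacency : List (Int × List Int)) (U : List Int)
    (hcl : ∀ z y, y ∈ pvAsc adjacency z → y ∈ U) :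
    ∀ (f : Nat) (c : List Int) (s : List Int) (g : Nat), (∀ y ∈ s, y ∈ U) →
      s.length + pvU U c * (pvTot adjacency + 1) ≤ f → pvU U c < g →
      pvLoopA adjacency f c s = s.foldl (fun c y => pvVisit adjacency g c y) c := by
  intro f
  induction f with
  | zero =>
      intro c s g hs hμ hg
      have : s = [] := by
        cases s with
        | nil => rfl
        | cons a t => simp at hμ
      subst this; rfl
  | succ f ih =>
      intro c s g hs hμ hg
      cases s with
      | nil => rfl
      | cons x s' =>
          obtain ⟨g', rfl⟩ : ∃ g', g = g' + 1 := ⟨g - 1, by omega⟩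
          have hxU : x ∈ U := hs x List.mem_cons_self
          rw [pvLoopA]
          simp only [List.foldl_cons]
          by_cases hx : PySem.Set.contains c x = true
          · rw [if_pos hx]
            have hx' : c.contains x = true := by rw [← pvContains_eq]; exact hx
            have hdfs : pvVisit adjacency (g' + 1) c x = c := by
              rw [pvVisit_succ, if_pos hx']
            rw [hdfs]
            apply ih c s' (g' + 1) (fun z hz => hs z (List.mem_cons_of_mem _ hz))
            · simp at hμ ⊢; omega
            · exact hg
          · rw [if_neg hx]
            have hx' : ¬ c.contains x = true := by rw [← pvContains_eq]; exact hx
            have hxc : x ∉ c := fun hm => hx ((PySem.Set.contains_iff _ _).mpr hm)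
            have hadd : PySem.Set.add c x = c ++ [x] := by
              rw [PySem.Set.add_eq_ite, if_neg hxc]
            have hdec := pvU_lt U c x hxU hxc
            have hnb := pvAsc_len adjacency x
            have hmul : (pvU U (c ++ [x]) + 1) * (pvTot adjacency + 1)
                ≤ pvU U c * (pvTot adjacency + 1) :=
              Nat.mul_le_mul_right _ (by omega)
            rw [hadd, pvNbrsA_eq]
            rw [ih (c ++ [x]) (pvAsc adjacency x ++ s') (g' + 1)
                (by intro z hz
                    rcases List.mem_append.mp hz with h1 | h2
                    · exact hcl x z h1
                    · exact hs z (List.mem_cons_of_mem _ h2))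
                (by simp only [List.length_append, List.length_cons] at hμ ⊢
                    rw [Nat.add_mul] at hmul
                    omega)
                (by omega)]
            rw [List.foldl_append]
            have hdfs : pvVisit adjacency (g' + 1) c x
                = (pvAsc adjacency x).foldl (fun c y => pvVisit adjacency g' c y)
                    (c ++ [x]) := by rw [pvVisit_succ, if_neg hx']
            rw [hdfs]
            have hinner : (pvAsc adjacency x).foldl (fun c y => pvVisit adjacency (g' + 1) c y)
                (c ++ [x])
                = (pvAsc adjacency x).foldl (fun c y => pvVisit adjacency g' c y)
                    (c ++ [x]) := by
              apply pvFoldFuel adjacency U hcl _ _ (g' + 1) g'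
                (fun z hz => hcl x z hz) (by omega) (by omega)
            rw [hinner]

-- B's visit preserves duplicate-freedom of the component list
theorem pvVisitNodup (adjacency : List (Int × List Int)) :
    ∀ (fuel : Nat) (c : List Int) (x : Int), c.Nodup → (pvVisit adjacency fuel c x).Nodup := by
  intro fuel
  induction fuel with
  | zero => intro c x hc; rw [pvVisit_zero]; exact hc
  | succ f ih =>
      intro c x hc
      rw [pvVisit_succ]
      by_cases hx : c.contains x = true
      · rw [if_pos hx]; exact hc
      · rw [if_neg hx]
        have hxc : x ∉ c := fun hm => hx ((PySem.Set.contains_iff _ _).mpr hm)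
        have hstart : (c ++ [x]).Nodup := by
          simp [List.nodup_append, hc]
          intro a ha h
          exact hxc (h ▸ ha)
        have hfold : ∀ (l : List Int) (c' : List Int), c'.Nodup →
            (l.foldl (fun c y => pvVisit adjacency f c y) c').Nodup := by
          intro l
          induction l with
          | nil => intro c' hc'; exact hc'
          | cons y t iht =>
              intro c' hc'
              exact iht _ (ih c' y hc')
        exact hfold _ _ hstart

-- ===== VERDICT (by name: the statement is the Claim_ definition above) =====
theorem collect_component_py_spec : Claim_equal_collect_component_py := by
  intro start adjacency _
  unfold Spec_collect_component_py collect_component_py collect_component_py_alt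
  have hcl : ∀ z y, y ∈ pvAsc adjacency z → y ∈ pvUniv start adjacency := by
    intro z y hy
    exact List.mem_cons_of_mem _ (pvAsc_mem adjacency z y hy)
  have hU : pvU (pvUniv start adjacency) [] ≤ (pvUniv start adjacency).length :=
    List.length_filter_le _ _
  have hflat : (adjacency.flatMap (fun p => p.1 :: p.2)).length
      = adjacency.length + (adjacency.map (fun p => p.2.length)).sum := by
    induction adjacency with
    | nil => simp
    | cons p t ih => simp; omega
  have hlen : (pvUniv start adjacency).length
      = 1 + adjacency.length + (adjacency.map (fun p => p.2.length)).sum := by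
    simp [pvUniv, hflat]; omega
  have hg : pvU (pvUniv start adjacency) []
      < 2 + adjacency.length + (adjacency.map (fun p => p.2.length)).sum := by omega
  have he : (PySem.Set.empty : PySem.Set Int) = [] := rfl
  rw [he]
  rw [pvLoopMain adjacency (pvUniv start adjacency) hcl _ _ _
      (2 + adjacency.length + (adjacency.map (fun p => p.2.length)).sum)
      (by intro y hy
          simp only [List.mem_singleton] at hy
          subst hy
          exact List.mem_cons_self)
      (by have := Nat.mul_le_mul_right (pvTot adjacency + 1) hU
          simp only [List.length_singleton]
          omega)
      hg]
  simp only [List.foldl_cons, List.foldl_nil]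
  exact (PySem.Set.ofList_eq_self_of_nodup _
    (pvVisitNodup adjacency _ [] start List.nodup_nil)).symm
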